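-- pv_equiv track=rewrite | github.com/mumtazcem/Amazon-meta-graph | main.py | most_crowded_module
-- ===== SOURCE A (Python) =====
-- def most_crowded_module(all_components):
--     max_len = 0
--     most_crowded_modules = []
--     for component in all_components:
--         if max_len < len(component):
--             max_len = len(component)
--     for component in all_components:
--         if max_len == len(component):
--             most_crowded_modules.append(component)
--     return max_len, most_crowded_modules
-- ===== SOURCE B (Python) =====
-- def most_crowded_module(all_components):
--     max_len = 0
--     result = []
--     for component in all_components:
--         n = len(component)
--         if max_len < n:
--             max_len = n
--             result = [component]
--         elif max_len == n:
--             result.append(component)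
--     return max_len, result
-- ===== Notes on version B (the rewrite author's own statement) =====
-- stated objective: alternative
-- what changed: Fuses A's two passes (max pass, then filter pass) into a single pass maintaining the running maximum and the list of components attaining it, resetting the list when a new maximum appears.
import Mathlib
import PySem

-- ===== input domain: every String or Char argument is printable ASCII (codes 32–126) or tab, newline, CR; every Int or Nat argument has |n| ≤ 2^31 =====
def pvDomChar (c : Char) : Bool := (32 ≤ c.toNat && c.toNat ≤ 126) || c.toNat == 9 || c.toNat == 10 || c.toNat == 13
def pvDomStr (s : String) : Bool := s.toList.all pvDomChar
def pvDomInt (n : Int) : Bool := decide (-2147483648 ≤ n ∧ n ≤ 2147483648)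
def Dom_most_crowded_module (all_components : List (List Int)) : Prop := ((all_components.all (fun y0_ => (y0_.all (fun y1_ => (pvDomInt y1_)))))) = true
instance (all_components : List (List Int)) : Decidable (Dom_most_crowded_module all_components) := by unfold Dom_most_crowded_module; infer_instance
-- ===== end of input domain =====

-- B fuses A's two passes into a single pass keeping the running maximum and the list of its attainers (objective: alternative decomposition).

-- ===== PORT A =====
def most_crowded_module (all_components : List (List Int)) : Int × List (List Int) :=
  let max_len : Int :=
    all_components.foldl (fun m component =>
      if m < (component.length : Int) then (component.length : Int) else m) 0
  let most_crowded_modules : List (List Int) :=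
    all_components.foldl (fun acc component =>
      if max_len = (component.length : Int) then acc ++ [component] else acc) []
  (max_len, most_crowded_modules)

-- ===== PORT B =====
def most_crowded_module_alt (all_components : List (List Int)) : Int × List (List Int) :=
  all_components.foldl (fun st component =>
    if st.1 < (component.length : Int) then ((component.length : Int), [component])
    else if st.1 = (component.length : Int) then (st.1, st.2 ++ [component])
    else st) ((0 : Int), ([] : List (List Int)))

-- ===== PRECONDITION & SPEC =====
def Spec_most_crowded_module (all_components : List (List Int)) (out : Int × List (List Int)) : Prop := out = most_crowded_module_alt all_components
instance (all_components : List (List Int)) (out : Int × List (List Int)) : Decidable (Spec_most_crowded_module all_components out) := by unfold Spec_most_crowded_module; infer_instance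

-- ===== CLAIM (what is proved, stated in full; the proofs are below) =====
def Claim_equal_most_crowded_module : Prop := ∀ (all_components : List (List Int)), Dom_most_crowded_module all_components → Spec_most_crowded_module all_components (most_crowded_module all_components)

-- ===== LEMMAS AND PROOFS =====

-- The running maximum never decreases along A's first fold.
theorem le_foldl_max (cs : List (List Int)) (m : Int) :
    m ≤ cs.foldl (fun m c => if m < (c.length : Int) then (c.length : Int) else m) m := by
  induction cs generalizing m with
  | nil => simp
  | cons c cs ih =>
    simp only [List.foldl_cons]
    split
    · exact le_trans (le_of_lt (by assumption)) (ih _)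
    · exact ih _

-- Invariant for B's single fold: it computes A's maximum together with the filter of attainers.
set_option maxRecDepth 8192 in
theorem alt_foldl_inv (cs : List (List Int)) (m : Int) (r : List (List Int)) :
    cs.foldl (fun st (component : List Int) =>
      if st.1 < (component.length : Int) then ((component.length : Int), [component])
      else if st.1 = (component.length : Int) then (st.1, st.2 ++ [component])
      else st) (m, r)
    = (cs.foldl (fun m c => if m < (c.length : Int) then (c.length : Int) else m) m,
       (if m = cs.foldl (fun m c => if m < (c.length : Int) then (c.length : Int) else m) m then r else [])
        ++ cs.filter (fun c => decide ((cs.foldl (fun m c => if m < (c.length : Int) then (c.length : Int) else m) m) = (c.length : Int)))) := by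
  induction cs generalizing m r with
  | nil => simp
  | cons c cs ih =>
    simp only [List.foldl_cons, List.filter_cons]
    by_cases h1 : m < (c.length : Int)
    · simp only [if_pos h1]
      rw [ih]
      have hM : (c.length : Int) ≤ cs.foldl (fun m c => if m < (c.length : Int) then (c.length : Int) else m) (c.length : Int) := le_foldl_max cs _
      have hne : ¬ (m = cs.foldl (fun m c => if m < (c.length : Int) then (c.length : Int) else m) (c.length : Int)) := by
        intro h; omega
      rw [if_neg hne]
      by_cases h2 : ((c.length : Int) = cs.foldl (fun m c => if m < (c.length : Int) then (c.length : Int) else m) (c.length : Int))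
      · have hd : decide (cs.foldl (fun m c => if m < (c.length : Int) then (c.length : Int) else m) (c.length : Int) = (c.length : Int)) = true := decide_eq_true h2.symm
        rw [if_pos h2, hd, if_pos rfl]
        simp only [List.singleton_append, List.nil_append]
      · have hd : decide (cs.foldl (fun m c => if m < (c.length : Int) then (c.length : Int) else m) (c.length : Int) = (c.length : Int)) = false := by
          exact decide_eq_false (fun h => h2 h.symm)
        rw [if_neg h2, hd, if_neg Bool.false_ne_true]
    · simp only [if_neg h1]
      by_cases h2 : m = (c.length : Int)
      · rw [if_pos h2, ih]
        by_cases h3 : m = cs.foldl (fun m c => if m < (c.length : Int) then (c.length : Int) else m) m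
        · have hMl : cs.foldl (fun m c => if m < (c.length : Int) then (c.length : Int) else m) m = (c.length : Int) := by omega
          have hd : decide (cs.foldl (fun m c => if m < (c.length : Int) then (c.length : Int) else m) m = (c.length : Int)) = true := decide_eq_true hMl
          rw [if_pos h3, if_pos h3, hd, if_pos rfl]
          simp only [List.append_assoc, List.singleton_append]
        · have hMge : m ≤ cs.foldl (fun m c => if m < (c.length : Int) then (c.length : Int) else m) m := le_foldl_max cs _
          have hMl : ¬ (cs.foldl (fun m c => if m < (c.length : Int) then (c.length : Int) else m) m = (c.length : Int)) := by omega
          have hd : decide (cs.foldl (fun m c => if m < (c.length : Int) then (c.length : Int) else m) m = (c.length : Int)) = false := decide_eq_false hMl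
          rw [if_neg h3, if_neg h3, hd, if_neg Bool.false_ne_true]
      · rw [if_neg h2, ih]
        have hMge : m ≤ cs.foldl (fun m c => if m < (c.length : Int) then (c.length : Int) else m) m := le_foldl_max cs _
        have hMl : ¬ (cs.foldl (fun m c => if m < (c.length : Int) then (c.length : Int) else m) m = (c.length : Int)) := by omega
        have hd : decide (cs.foldl (fun m c => if m < (c.length : Int) then (c.length : Int) else m) m = (c.length : Int)) = false := decide_eq_false hMl
        rw [hd, if_neg Bool.false_ne_true]

-- ===== VERDICT (by name: the statement is the Claim_ definition above) =====
theorem most_crowded_module_spec : Claim_equal_most_crowded_module := by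
  intro cs _
  show most_crowded_module cs = most_crowded_module_alt cs
  unfold most_crowded_module most_crowded_module_alt
  rw [alt_foldl_inv]
  simp [PySem.List.foldl_append_ite_eq_filter]
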